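-- pv_equiv track=rewrite | github.com/barszu/ASD | perelki/gen masek z tab.py | mask_gen
-- ===== SOURCE A (Python) =====
-- def mask_gen(n , base = 2):
--     # n - dlugosc masek
--     # base - baza -> dla binarnej 2
--     q = base**n
--     maski = [[0 for _ in range(n)] for _q in range(q)]
--     #num jest tez taki jak id maski w maskach
--     for num in range ( 0 , q):
--         id = n - 1
--         a = num
--         while a != 0 :
--             maski[num][id] = a%base
--             a //= base
--             id -= 1
--     return maski
-- ===== SOURCE B (Python) =====
-- def mask_gen(n, base=2):
--     # n - mask length, base - numeral base
--     # Odometer enumeration: keep the current digit vector and increment it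
--     # with carry once per row, instead of decoding every number by division.
--     q = base ** n
--     if q <= 0:
--         return []
--     out = []
--     digits = [0] * n
--     for _ in range(q):
--         out.append(digits[:])
--         i = n - 1
--         while i >= 0:
--             digits[i] += 1
--             if digits[i] < base:
--                 break
--             digits[i] = 0
--             i -= 1
--     return out
-- ===== Notes on version B (the rewrite author's own statement) =====
-- stated objective: alternative
-- what changed: B enumerates the masks incrementally with an odometer digit vector incremented with carry once per row, instead of A's scheme of pre-allocating base**n zero rows and decoding each row number by repeated floor-division and modulo.
-- outside the precondition, e.g. on mask_gen(-1, 2): A raises TypeError, B raises TypeError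
import Mathlib
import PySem

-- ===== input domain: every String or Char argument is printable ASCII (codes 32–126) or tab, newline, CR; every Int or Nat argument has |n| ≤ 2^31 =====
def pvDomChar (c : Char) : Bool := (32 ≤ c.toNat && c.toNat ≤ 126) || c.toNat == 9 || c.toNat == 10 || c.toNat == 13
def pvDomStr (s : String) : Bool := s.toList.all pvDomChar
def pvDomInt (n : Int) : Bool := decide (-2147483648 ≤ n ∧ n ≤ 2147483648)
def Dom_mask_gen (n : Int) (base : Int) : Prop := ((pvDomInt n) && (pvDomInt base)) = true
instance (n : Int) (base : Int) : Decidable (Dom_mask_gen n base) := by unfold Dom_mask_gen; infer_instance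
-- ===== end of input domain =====

-- B replaces A's per-number base decoding by an incremental odometer (carry-increment) enumeration; same output, similar cost.


-- ===== PORT A =====
-- inner 'while a != 0' loop of A; fuel-guarded (under Pre_ the fuel a.natAbs+1 is never exhausted)
def maskInner : Nat → Int → Int → Int → List Int → List Int
  | 0, _, _, _, row => row
  | fuel + 1, a, id, base, row =>
    if a = 0 then row
    else maskInner fuel (PySem.Int.floordiv a base) (id - 1) base
           (PySem.List.pySetD row id (PySem.Int.mod a base))

-- base ^ n.toNat is exact for n ≥ 0 (Pre_); for n < 0 Python's base**n is a float and A raises TypeError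
def mask_gen (n : Int) (base : Int) : List (List Int) :=
  let q : Int := base ^ n.toNat
  let maski : List (List Int) :=
    (PySem.List.pyRange 0 q 1).map (fun _ => (PySem.List.pyRange 0 n 1).map (fun _ => (0 : Int)))
  (PySem.List.pyRange 0 q 1).foldl
    (fun m num => PySem.List.pySetD m num
      (maskInner (num.natAbs + 1) num (n - 1) base (PySem.List.pyGetD m num [])))
    maski

-- ===== PORT B =====
-- one carry-increment of the odometer; B's right-to-left while loop, transcribed on the reversed digit list
def odoInc (base : Int) : List Int → List Int
  | [] => []
  | d :: ds => if d + 1 < base then (d + 1) :: ds else 0 :: odoInc base ds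

def odoStep (base : Int) (digits : List Int) : List Int := (odoInc base digits.reverse).reverse

def mask_gen_alt (n : Int) (base : Int) : List (List Int) :=
  let q : Int := base ^ n.toNat
  if q ≤ 0 then [] else
  ((PySem.List.pyRange 0 q 1).foldl
    (fun s _ => (s.1 ++ [s.2], odoStep base s.2))
    (([] : List (List Int)), List.replicate n.toNat (0 : Int))).1

-- ===== PRECONDITION & SPEC =====
-- Pre_ excludes n < 0, where A raises TypeError (base**n is a float), and base ≤ -2 with even n ≥ 2,
-- where A's returned rows are an artefact: floor-mod digits of a negative base written through
-- negative-index list wraparound (all other negative bases stay inside: there A and B agree).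
def Pre_mask_gen (n : Int) (base : Int) : Prop :=
  0 ≤ n ∧ (0 ≤ base ∨ PySem.Int.mod n 2 = 1 ∨ n = 0 ∨ base = -1)
instance (n : Int) (base : Int) : Decidable (Pre_mask_gen n base) := by
  unfold Pre_mask_gen; infer_instance
def pvWitness_mask_gen : Int × Int := (2, 3)

def Spec_mask_gen (n : Int) (base : Int) (out : List (List Int)) : Prop := out = mask_gen_alt n base
instance (n : Int) (base : Int) (out : List (List Int)) : Decidable (Spec_mask_gen n base out) := by unfold Spec_mask_gen; infer_instance

-- ===== CLAIM (what is proved, stated in full; the proofs are below) =====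
def Claim_equal_mask_gen : Prop := ∀ (n : Int) (base : Int), Dom_mask_gen n base → Pre_mask_gen n base → Spec_mask_gen n base (mask_gen n base)

-- ===== LEMMAS AND PROOFS =====

def rep : Nat → Int → Int → List Int
  | 0, _, _ => []
  | N + 1, b, m => rep N b (PySem.Int.floordiv m b) ++ [PySem.Int.mod m b]

theorem foldB (st : List Int → List Int) :
    ∀ (k : Nat) (out : List (List Int)) (d : List Int) (j : Int),
      ((PySem.List.pyRange j (j + k) 1).foldl
        (fun s _ => (s.1 ++ [s.2], st s.2)) (out, d)).1
      = out ++ (List.range k).map (fun i => st^[i] d) := by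
  intro k
  induction k with
  | zero => intro out d j; rw [PySem.List.pyRange_one_eq_nil (by omega : j + ((0:Nat) : Int) ≤ j)]; simp
  | succ k ih =>
    intro out d j
    rw [PySem.List.pyRange_one_cons (by push_cast; omega)]
    have : j + 1 + (k : Int) = j + ((k : Nat) + 1 : Nat) := by push_cast; ring
    rw [List.foldl_cons]
    rw [← this, ih (out ++ [d]) (st d) (j + 1), List.range_succ_eq_map]
    simp only [List.map_cons, Function.iterate_zero, id_eq, List.map_map, List.append_assoc,
      List.cons_append, List.nil_append]
    congr 2

theorem foldA (f : Int → List Int → List Int) (r : List Int) :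
    ∀ (k : Nat) (done : List (List Int)) (j : Int), done.length = j.toNat → 0 ≤ j →
      (PySem.List.pyRange j (j + k) 1).foldl
        (fun m num => PySem.List.pySetD m num (f num (PySem.List.pyGetD m num [])))
        (done ++ List.replicate k r)
      = done ++ (List.range k).map (fun (i : Nat) => f (j + (i : Int)) r) := by
  intro k
  induction k with
  | zero => intro done j hl hj; rw [PySem.List.pyRange_one_eq_nil (by omega : j + ((0:Nat) : Int) ≤ j)]; simp
  | succ k ih =>
    intro done j hl hj
    rw [PySem.List.pyRange_one_cons (by push_cast; omega)]
    rw [List.foldl_cons]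
    have hget : PySem.List.pyGetD (done ++ List.replicate (k+1) r) j [] = r := by
      rw [PySem.List.pyGetD_of_nonneg _ _ hj]
      rw [List.getD_eq_getElem?_getD, List.getElem?_append_right (by omega)]
      simp [hl, List.replicate_succ]
    have hset : PySem.List.pySetD (done ++ List.replicate (k+1) r) j (f j r)
        = (done ++ [f j r]) ++ List.replicate k r := by
      rw [PySem.List.pySetD_of_nonneg _ _ hj]
      rw [List.set_append, if_neg (by omega)]
      simp [hl, List.replicate_succ]
    rw [hget, hset]
    have : j + 1 + (k : Int) = j + ((k : Nat) + 1 : Nat) := by push_cast; ring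
    rw [← this, ih (done ++ [f j r]) (j + 1) (by simp [hl]; omega) (by omega),
      List.range_succ_eq_map]
    simp only [List.map_cons, Nat.cast_zero, add_zero, List.map_map, List.append_assoc,
      List.cons_append, List.nil_append]
    congr 2
    apply List.map_congr_left
    intro a _
    have h3 : j + 1 + (a : Int) = j + ((a.succ : Nat) : Int) := by push_cast; ring
    simp only [Function.comp_apply, h3]

theorem rep_zero (N : Nat) (b : Int) (hb : 0 < b) : rep N b 0 = List.replicate N 0 := by
  induction N with
  | zero => rfl
  | succ N ih =>
    simp [rep, PySem.Int.floordiv_eq_ediv_of_pos hb, PySem.Int.mod_eq_emod_of_pos hb, ih,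
      List.replicate_succ']

theorem maskInner_eq (b : Int) (hb : 0 ≤ b) :
    ∀ (N : Nat) (m : Int) (fuel : Nat) (tail : List Int), 0 ≤ m → m < b ^ N →
      m.natAbs < fuel →
      maskInner fuel m ((N : Int) - 1) b (List.replicate N 0 ++ tail) = rep N b m ++ tail := by
  intro N
  induction N with
  | zero =>
    intro m fuel tail hm hlt hfuel
    have hm0 : m = 0 := by simp at hlt; omega
    obtain ⟨f, rfl⟩ : ∃ f, fuel = f + 1 := ⟨fuel - 1, by omega⟩
    simp [maskInner, hm0, rep]
  | succ N ih =>
    intro m fuel tail hm hlt hfuel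
    by_cases hm0 : m = 0
    · obtain ⟨f, rfl⟩ : ∃ f, fuel = f + 1 := ⟨fuel - 1, by omega⟩
      have hb1 : 0 < b := by
        rcases lt_or_eq_of_le hb with h | h
        · exact h
        · exfalso; rw [← h] at hlt; simp [hm0] at hlt
      simp [maskInner, hm0, rep_zero _ _ hb1]
    · have hmpos : 0 < m := lt_of_le_of_ne hm (Ne.symm hm0)
      have hb2 : 2 ≤ b := by
        by_contra h
        have : b ≤ 1 := by omega
        have : b ^ (N + 1) ≤ 1 := by
          calc b ^ (N + 1) ≤ 1 ^ (N + 1) := pow_le_pow_left₀ hb this _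
          _ = 1 := one_pow _
        omega
      obtain ⟨f, rfl⟩ : ∃ f, fuel = f + 1 := ⟨fuel - 1, by omega⟩
      have hbpos : (0 : Int) < b := by omega
      rw [maskInner, if_neg hm0]
      have hid : ((N + 1 : Nat) : Int) - 1 = ((N : Nat) : Int) := by push_cast; ring
      have hrow : PySem.List.pySetD (List.replicate (N + 1) 0 ++ tail) (((N + 1 : Nat) : Int) - 1)
          (PySem.Int.mod m b) = List.replicate N 0 ++ (PySem.Int.mod m b :: tail) := by
        rw [hid, PySem.List.pySetD_of_nonneg _ _ (by positivity)]
        rw [List.replicate_succ', Int.toNat_natCast, List.append_assoc, List.set_append,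
          if_neg (by simp)]
        simp
      rw [hrow, hid]
      have hdiv := PySem.Int.floordiv_eq_ediv_of_pos (a := m) hbpos
      have hfd0 : 0 ≤ PySem.Int.floordiv m b := by rw [hdiv]; exact Int.ediv_nonneg hm (le_of_lt hbpos)
      have hfdlt : PySem.Int.floordiv m b < b ^ N := by
        rw [hdiv, Int.ediv_lt_iff_lt_mul hbpos, ← pow_succ]; exact hlt
      have hfsm : (PySem.Int.floordiv m b).natAbs < f := by
        have h1 : PySem.Int.floordiv m b < m := by
          rw [hdiv]
          have h4 := Int.ediv_le_self (b := b) (le_of_lt hmpos)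
          rcases (by omega : m / b < m ∨ m / b = m) with h | h
          · exact h
          · exfalso
            have h5 := Int.mul_ediv_add_emod m b
            have hm6 := Int.emod_nonneg m (by omega : b ≠ 0)
            nlinarith
        omega
      have := ih (PySem.Int.floordiv m b) f (PySem.Int.mod m b :: tail) hfd0 hfdlt hfsm
      rw [this]
      simp [rep]

theorem incR (b : Int) (hb : 0 ≤ b) :
    ∀ (N : Nat) (m : Int), 0 ≤ m → m + 1 < b ^ N →
      odoInc b (rep N b m).reverse = (rep N b (m + 1)).reverse := by
  intro N
  induction N with
  | zero => intro m hm hlt; simp at hlt; omega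
  | succ N ih =>
    intro m hm hlt
    have hb2 : 2 ≤ b := by
      by_contra h
      have h1 : b ≤ 1 := by omega
      have : b ^ (N + 1) ≤ 1 := by
        calc b ^ (N + 1) ≤ 1 ^ (N + 1) := pow_le_pow_left₀ hb h1 _
        _ = 1 := one_pow _
      omega
    have hbpos : (0 : Int) < b := by omega
    set q := PySem.Int.floordiv m b with hq
    set r := PySem.Int.mod m b with hr
    have hqr := PySem.Int.floordiv_mul_add_mod m b
    have hr0 : 0 ≤ r := PySem.Int.mod_nonneg m hbpos
    have hrb : r < b := PySem.Int.mod_lt m hbpos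
    have hq0 : 0 ≤ q := by rw [hq, PySem.Int.floordiv_eq_ediv_of_pos hbpos]; exact Int.ediv_nonneg hm (le_of_lt hbpos)
    simp only [rep, List.reverse_append, List.reverse_cons, List.reverse_nil, List.nil_append,
      List.singleton_append, ← hq, ← hr]
    by_cases hcase : r + 1 < b
    · have hfd : PySem.Int.floordiv (m + 1) b = q := by
        rw [PySem.Int.floordiv_eq_iff_of_pos hbpos]; constructor <;> nlinarith
      have hmd : PySem.Int.mod (m + 1) b = r + 1 := by
        have := PySem.Int.floordiv_mul_add_mod (m + 1) b
        rw [hfd] at this; linarith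
      rw [odoInc, if_pos hcase, hfd, hmd]
    · have hrtop : r = b - 1 := by omega
      have hfd : PySem.Int.floordiv (m + 1) b = q + 1 := by
        rw [PySem.Int.floordiv_eq_iff_of_pos hbpos]; constructor <;> nlinarith
      have hmd : PySem.Int.mod (m + 1) b = 0 := by
        have := PySem.Int.floordiv_mul_add_mod (m + 1) b
        rw [hfd] at this; nlinarith
      have hqlt : q + 1 < b ^ N := by
        have hm1 : m + 1 = (q + 1) * b := by nlinarith
        have : (q + 1) * b < b ^ N * b := by rw [← hm1, ← pow_succ]; exact hlt
        exact lt_of_mul_lt_mul_right this (le_of_lt hbpos)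
      rw [odoInc, if_neg hcase, hfd, hmd, ih q hq0 hqlt]

theorem iterate_rep (b : Int) (hb : 0 ≤ b) (N : Nat) :
    ∀ (k : Nat), (k : Int) < b ^ N →
      (odoStep b)^[k] (List.replicate N 0) = rep N b (k : Int) := by
  intro k
  induction k with
  | zero =>
    intro hlt
    rcases Nat.eq_zero_or_pos N with h | h
    · subst h; rfl
    · have hbpos : (0 : Int) < b := by
        rcases lt_or_eq_of_le hb with h' | h'
        · exact h'
        · exfalso; rw [← h'] at hlt; rw [zero_pow (by omega)] at hlt; omega
      simp [rep_zero _ _ hbpos]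
  | succ k ih =>
    intro hlt
    have hk : (k : Int) < b ^ N := by push_cast at hlt ⊢; omega
    rw [Function.iterate_succ_apply', ih hk, odoStep, incR b hb N k (by positivity) (by push_cast at hlt ⊢; omega)]
    rw [List.reverse_reverse]
    norm_num

theorem q_one (n base : Int) (h1 : base ^ n.toNat = 1) :
    mask_gen n base = mask_gen_alt n base := by
  simp only [mask_gen, mask_gen_alt, h1]
  rw [if_neg (by omega)]
  have hr : PySem.List.pyRange 0 1 1 = [0] := by decide
  rw [hr]
  simp only [List.map_cons, List.map_nil, List.foldl_cons, List.foldl_nil]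
  rw [PySem.List.pyGetD_of_nonneg _ _ le_rfl, PySem.List.pySetD_of_nonneg _ _ le_rfl]
  simp [maskInner]

theorem mask_gen_eq_alt (n base : Int) (hn : 0 ≤ n)
    (hcase : 0 ≤ base ∨ PySem.Int.mod n 2 = 1 ∨ n = 0 ∨ base = -1) :
    mask_gen n base = mask_gen_alt n base := by
  by_cases hb : 0 ≤ base
  · lift n to Nat using hn with N
    simp only [mask_gen, mask_gen_alt, Int.toNat_natCast]
    have hq0 : (0 : Int) ≤ base ^ N := by positivity
    by_cases hqz : base ^ N ≤ (0 : Int)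
    · rw [if_pos hqz]
      have hz : base ^ N = (0 : Int) := le_antisymm hqz hq0
      simp [PySem.List.pyRange_one_eq_nil (le_of_eq hz)]
    rw [if_neg hqz]
    set Q : Int := base ^ N with hQ
    have hQcast : Q = ((Q.toNat : Nat) : Int) := (Int.toNat_of_nonneg hq0).symm
    have hrange : PySem.List.pyRange 0 Q 1 = PySem.List.pyRange 0 (0 + (Q.toNat : Int)) 1 := by
      rw [zero_add, ← hQcast]
    have hmaski : (PySem.List.pyRange 0 Q 1).map
        (fun _ => (PySem.List.pyRange 0 (N : Int) 1).map (fun _ => (0 : Int)))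
        = [] ++ List.replicate Q.toNat (List.replicate N 0) := by
      rw [List.nil_append]
      rw [List.map_const']
      congr 1
      · rw [PySem.List.length_pyRange_one]; simp
      · rw [List.map_const']
        congr 1
        rw [PySem.List.length_pyRange_one]; simp
    rw [hmaski, hrange,
      foldA (fun num row => maskInner (num.natAbs + 1) num ((N : Int) - 1) base row)
        (List.replicate N 0) Q.toNat [] 0 rfl le_rfl,
      foldB (odoStep base) Q.toNat [] (List.replicate N 0) 0]
    simp only [List.nil_append]
    apply List.map_congr_left
    intro i hi
    rw [List.mem_range] at hi
    have hiQ : (i : Int) < Q := by rw [hQcast]; exact_mod_cast hi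
    have h1 : maskInner ((0 + (i : Int)).natAbs + 1) (0 + (i : Int)) ((N : Int) - 1) base
        (List.replicate N 0) = rep N base (i : Int) := by
      have := maskInner_eq base hb N (i : Int) (i + 1) [] (by positivity)
        (by rw [← hQ]; simpa using hiQ) (by simp)
      simpa using this
    rw [zero_add] at h1 ⊢
    rw [h1, iterate_rep base hb N i (by rw [← hQ]; exact hiQ)]
  · have hrest := hcase.resolve_left hb
    have hnegcase : Odd n.toNat → mask_gen n base = mask_gen_alt n base := by
      intro hoddN
      have hqneg : base ^ n.toNat < 0 := Odd.pow_neg hoddN (by omega)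
      simp [mask_gen, mask_gen_alt, PySem.List.pyRange_one_eq_nil (le_of_lt hqneg),
        le_of_lt hqneg]
    rcases hrest with hodd | hn0 | hbm1
    · refine hnegcase ?_
      rw [PySem.Int.mod_eq_emod_of_pos (by omega)] at hodd
      rw [Nat.odd_iff]
      omega
    · exact q_one n base (by simp [hn0])
    · rcases Nat.even_or_odd n.toNat with hev | hoddN
      · exact q_one n base (by rw [hbm1, hev.neg_one_pow])
      · exact hnegcase hoddN

-- ===== VERDICT (by name: the statement is the Claim_ definition above) =====
theorem mask_gen_spec : Claim_equal_mask_gen := by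
  intro n base _ hpre
  unfold Spec_mask_gen
  exact mask_gen_eq_alt n base hpre.1 hpre.2
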